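-- pv_equiv track=rewrite | github.com/1234567mm/mem-switch | backend/services/memory_injector.py | _build_context_string
-- ===== SOURCE A (Python) =====
-- def _build_context_string(memories: list[dict]) -> str:
--     """构建记忆上下文字符串"""
--     if not memories:
--         return ""
--
--     parts = ["[记忆上下文]\n"]
--
--     # 按 type 分组
--     by_type = {}
--     for mem in memories:
--         mem_type = mem.get("type", "unknown")
--         if mem_type not in by_type:
--             by_type[mem_type] = []
--         by_type[mem_type].append(mem)
--
--     # 按类型输出
--     type_labels = {
--         "preference": "偏好习惯",
--         "expertise": "专业知识",
--         "project_context": "项目上下文",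
--     }
--
--     for mem_type, mems in by_type.items():
--         label = type_labels.get(mem_type, mem_type)
--         parts.append(f"\n{label}:\n")
--         for mem in mems:
--             parts.append(f"- {mem['content']}\n")
--
--     return "".join(parts).strip()
-- ===== SOURCE B (Python) =====
-- def _build_context_string(memories: list[dict]) -> str:
--     """构建记忆上下文字符串"""
--     if not memories:
--         return ""
--
--     type_labels = {
--         "preference": "偏好习惯",
--         "expertise": "专业知识",
--         "project_context": "项目上下文",
--     }
--
--     # distinct types in first-appearance order
--     types = []
--     for mem in memories:
--         t = mem.get("type", "unknown")
--         if t not in types: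
--             types.append(t)
--
--     def block(t):
--         entries = "".join(
--             f"- {mem['content']}\n"
--             for mem in memories
--             if mem.get("type", "unknown") == t
--         )
--         return f"\n{type_labels.get(t, t)}:\n" + entries
--
--     return ("[记忆上下文]\n" + "".join(block(t) for t in types)).strip()
-- ===== Notes on version B (the rewrite author's own statement) =====
-- stated objective: alternative
-- what changed: Replaces A's grouping dict and mutable parts list by deduplicating the types in first-appearance order and concatenating one filtered-and-joined block string per type.
-- outside the precondition, e.g. on _build_context_string([{'type': 'preference'}]): A raises KeyError, B raises KeyError
import Mathlib
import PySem

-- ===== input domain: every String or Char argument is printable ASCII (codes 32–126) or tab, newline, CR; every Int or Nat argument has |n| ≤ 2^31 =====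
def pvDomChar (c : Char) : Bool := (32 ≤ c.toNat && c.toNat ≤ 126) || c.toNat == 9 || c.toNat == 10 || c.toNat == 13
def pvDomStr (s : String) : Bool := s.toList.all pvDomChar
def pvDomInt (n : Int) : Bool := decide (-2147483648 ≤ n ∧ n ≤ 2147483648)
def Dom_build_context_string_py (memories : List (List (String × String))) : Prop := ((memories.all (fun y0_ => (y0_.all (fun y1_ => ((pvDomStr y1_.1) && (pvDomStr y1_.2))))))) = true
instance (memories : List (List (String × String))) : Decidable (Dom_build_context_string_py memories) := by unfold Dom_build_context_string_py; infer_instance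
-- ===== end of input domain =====

-- B drops A's grouping dict and parts-list accumulation: it deduplicates the types in first-appearance order and builds the result by direct string concatenation of per-type blocks (filter + join); same output, no speed claim.

-- ===== PORT A =====
-- mem.get("type", "unknown")
def pvTypeOf (mem : List (String × String)) : String :=
  (PySem.Dict.mk mem).getD "type" "unknown"

-- mem["content"]; KeyError (= none) is excluded by Pre_, outside Pre_ the port's value is unclaimed
def pvContentOf (mem : List (String × String)) : String :=
  ((PySem.Dict.mk mem).get? "content").getD ""

def pvTypeLabels : PySem.Dict String String :=
  PySem.Dict.ofList [("preference", "偏好习惯"), ("expertise", "专业知识"), ("project_context", "项目上下文")]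

def build_context_string_py (memories : List (List (String × String))) : String :=
  if memories = [] then ""
  else
    let parts : List String := ["[记忆上下文]\n"]
    -- by_type: if mem_type not in by_type: by_type[mem_type] = []; by_type[mem_type].append(mem)
    let by_type : PySem.Dict String (List (List (String × String))) :=
      memories.foldl (fun d mem => d.modify (pvTypeOf mem) [] (· ++ [mem])) PySem.Dict.empty
    let parts := by_type.items.foldl (fun ps p =>
      let ps := ps ++ ["\n" ++ pvTypeLabels.getD p.1 p.1 ++ ":\n"]
      p.2.foldl (fun ps mem => ps ++ ["- " ++ pvContentOf mem ++ "\n"]) ps) parts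
    PySem.Str.strip (PySem.Str.join "" parts)

-- ===== PORT B =====
-- block(t): the label line followed by the joined entry lines of the matching memories
def pvBlock (memories : List (List (String × String))) (t : String) : String :=
  "\n" ++ pvTypeLabels.getD t t ++ ":\n" ++
    PySem.Str.join "" ((memories.filter (fun mem => pvTypeOf mem == t)).map
      (fun mem => "- " ++ pvContentOf mem ++ "\n"))

def build_context_string_py_alt (memories : List (List (String × String))) : String :=
  if memories = [] then ""
  else
    -- distinct types in first-appearance order ('if t not in types: types.append(t)')
    let types : List String := PySem.Set.ofList (memories.map pvTypeOf)
    PySem.Str.strip ("[记忆上下文]\n" ++ PySem.Str.join "" (types.map (pvBlock memories)))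

-- ===== PRECONDITION & SPEC =====
-- Pre_ excludes exactly the inputs where A raises KeyError: a memory without a "content" key.
def Pre_build_context_string_py (memories : List (List (String × String))) : Prop :=
  (memories.all (fun mem => (PySem.Dict.mk mem).contains "content")) = true
instance (memories : List (List (String × String))) : Decidable (Pre_build_context_string_py memories) := by unfold Pre_build_context_string_py; infer_instance

def pvWitness_build_context_string_py : (List (List (String × String))) :=
  [[("type", "preference"), ("content", "likes tea")], [("content", "x")]]

def Spec_build_context_string_py (memories : List (List (String × String))) (out : String) : Prop := out = build_context_string_py_alt memories
instance (memories : List (List (String × String))) (out : String) : Decidable (Spec_build_context_string_py memories out) := by unfold Spec_build_context_string_py; infer_instance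

-- ===== CLAIM (what is proved, stated in full; the proofs are below) =====
def Claim_equal_build_context_string_py : Prop := ∀ (memories : List (List (String × String))), Dom_build_context_string_py memories → Pre_build_context_string_py memories → Spec_build_context_string_py memories (build_context_string_py memories)

-- ===== LEMMAS AND PROOFS =====

-- the grouping dict's items are exactly (type, matching memories) over the distinct types in order
lemma by_type_items (memories : List (List (String × String))) :
    (memories.foldl (fun d mem => d.modify (pvTypeOf mem) [] (· ++ [mem])) PySem.Dict.empty).items
      = (PySem.Set.ofList (memories.map pvTypeOf)).map
          (fun t => (t, memories.filter (fun mem => pvTypeOf mem == t))) := by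
  have hmap : memories.foldl (fun d mem => d.modify (pvTypeOf mem) [] (· ++ [mem])) PySem.Dict.empty
      = (memories.map (fun m => (pvTypeOf m, m))).foldl
          (fun d p => d.modify p.1 [] (· ++ [p.2])) PySem.Dict.empty := by
    rw [List.foldl_map]
  have hnd : (memories.foldl (fun d mem => d.modify (pvTypeOf mem) [] (· ++ [mem]))
      PySem.Dict.empty).keys.Nodup :=
    PySem.Dict.nodup_keys_foldl_modify_key _ _ _ _ _ (by simp)
  rw [PySem.Dict.items_eq_map_keys _ hnd ([] : List (List (String × String)))]
  rw [PySem.Dict.keys_foldl_modify_key]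
  have hkeys : PySem.Set.update (PySem.Dict.empty : PySem.Dict String (List (List (String × String)))).keys (memories.map pvTypeOf)
      = PySem.Set.ofList (memories.map pvTypeOf) := by
    simp [PySem.Set.update_nil_left]
  rw [hkeys]
  apply List.map_congr_left
  intro t _
  have hgetD : (memories.foldl (fun d mem => d.modify (pvTypeOf mem) [] (· ++ [mem]))
      PySem.Dict.empty).getD t [] = memories.filter (fun mem => pvTypeOf mem == t) := by
    rw [hmap, PySem.Dict.getD_foldl_modify_append]
    simp [List.filter_map, Function.comp_def]
  rw [hgetD]

lemma chars_join_nil_cons (a : List Char) (l : List (List Char)) :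
    PySem.Chars.join [] (a :: l) = a ++ PySem.Chars.join [] l := by
  cases l with
  | nil => simp [PySem.Chars.join_singleton, PySem.Chars.join_nil]
  | cons b t => simp [PySem.Chars.join_cons_cons]

lemma join_empty_cons (a : String) (l : List String) :
    PySem.Str.join "" (a :: l) = a ++ PySem.Str.join "" l := by
  apply String.toList_injective
  simp [PySem.Str.join, chars_join_nil_cons]

lemma join_empty_append (l₁ l₂ : List String) :
    PySem.Str.join "" (l₁ ++ l₂) = PySem.Str.join "" l₁ ++ PySem.Str.join "" l₂ := by
  induction l₁ with
  | nil => apply String.toList_injective; simp [PySem.Str.join, PySem.Chars.join_nil]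
  | cons a t ih => simp [join_empty_cons, ih, String.append_assoc]

lemma join_empty_flatMap {α : Type} (l : List α) (g : α → List String) :
    PySem.Str.join "" (l.flatMap g) = PySem.Str.join "" (l.map (fun x => PySem.Str.join "" (g x))) := by
  induction l with
  | nil => simp
  | cons a t ih => simp [List.flatMap_cons, join_empty_append, join_empty_cons, ih]

-- ===== VERDICT (by name: the statement is the Claim_ definition above) =====
theorem build_context_string_py_spec : Claim_equal_build_context_string_py := by
  intro memories _ _
  unfold Spec_build_context_string_py build_context_string_py build_context_string_py_alt
  by_cases h : memories = []
  · simp [h]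
  · simp only [if_neg h]
    congr 1
    rw [by_type_items, List.foldl_map]
    have hstep : ∀ (ps : List String) (t : String),
        (memories.filter (fun mem => pvTypeOf mem == t)).foldl
            (fun ps mem => ps ++ ["- " ++ pvContentOf mem ++ "\n"])
            (ps ++ ["\n" ++ pvTypeLabels.getD t t ++ ":\n"])
          = ps ++ (("\n" ++ pvTypeLabels.getD t t ++ ":\n")
              :: (memories.filter (fun mem => pvTypeOf mem == t)).map
                  (fun mem => "- " ++ pvContentOf mem ++ "\n")) := by
      intro ps t
      rw [PySem.List.foldl_append_singleton_eq_map]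
      simp
    calc PySem.Str.join ""
          ((PySem.Set.ofList (memories.map pvTypeOf)).foldl (fun ps t =>
            (memories.filter (fun mem => pvTypeOf mem == t)).foldl
              (fun ps mem => ps ++ ["- " ++ pvContentOf mem ++ "\n"])
              (ps ++ ["\n" ++ pvTypeLabels.getD t t ++ ":\n"])) ["[记忆上下文]\n"])
        = PySem.Str.join "" (["[记忆上下文]\n"]
            ++ (PySem.Set.ofList (memories.map pvTypeOf)).flatMap (fun t =>
              ("\n" ++ pvTypeLabels.getD t t ++ ":\n")
                :: (memories.filter (fun mem => pvTypeOf mem == t)).map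
                    (fun mem => "- " ++ pvContentOf mem ++ "\n"))) := by
          congr 1
          rw [show (fun (ps : List String) t =>
            (memories.filter (fun mem => pvTypeOf mem == t)).foldl
              (fun ps mem => ps ++ ["- " ++ pvContentOf mem ++ "\n"])
              (ps ++ ["\n" ++ pvTypeLabels.getD t t ++ ":\n"]))
            = fun ps t => ps ++ (("\n" ++ pvTypeLabels.getD t t ++ ":\n")
                :: (memories.filter (fun mem => pvTypeOf mem == t)).map
                    (fun mem => "- " ++ pvContentOf mem ++ "\n")) from funext fun ps => funext fun t => hstep ps t]
          rw [PySem.List.foldl_append_eq_flatMap]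
      _ = "[记忆上下文]\n" ++ PySem.Str.join ""
            ((PySem.Set.ofList (memories.map pvTypeOf)).map (pvBlock memories)) := by
          rw [join_empty_append, join_empty_flatMap]
          have hblk : (fun t => PySem.Str.join ""
              (("\n" ++ pvTypeLabels.getD t t ++ ":\n")
                :: (memories.filter (fun mem => pvTypeOf mem == t)).map
                    (fun mem => "- " ++ pvContentOf mem ++ "\n")))
              = pvBlock memories := by
            funext t
            rw [join_empty_cons]
            simp [pvBlock, String.append_assoc]
          rw [hblk, show PySem.Str.join "" ["[记忆上下文]\n"] = "[记忆上下文]\n" by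
            apply String.toList_injective
            simp [PySem.Str.join, PySem.Chars.join_singleton]]
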